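-- pv_equiv track=rewrite | github.com/drgsl/B.Sc.ComputerScience-Archive | 5th Semester/Python Programming/FiIMaterials/Programare Python/Laborator/laborator_2021-2022/solutii/lab2/lab2.py | function9
-- ===== SOURCE A (Python) =====
-- def function9(matrix):
--
--     list_of_positions = []
--     matrix_transpose = list(zip(*matrix))
--
--     for c in range(len(matrix_transpose)):
--         for l in range(1, len(matrix_transpose[0])):
--             if matrix_transpose[c][l] <= max(matrix_transpose[c][:l]):
--                 list_of_positions.append(tuple((l, c)))
--     return list_of_positions
-- ===== SOURCE B (Python) =====
-- def function9(matrix):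
--     # One pass down the rows per column with a running prefix maximum,
--     # instead of recomputing max(column[:l]) for every row.
--     if not matrix:
--         return []
--     ncols = min(len(r) for r in matrix)
--     list_of_positions = []
--     for c in range(ncols):
--         best = matrix[0][c]
--         for l in range(1, len(matrix)):
--             v = matrix[l][c]
--             if v <= best:
--                 list_of_positions.append((l, c))
--             else:
--                 best = v
--     return list_of_positions
-- ===== Notes on version B (the rewrite author's own statement) =====
-- stated objective: faster
-- what changed: Replaced the transpose plus per-row max(column[:l]) rescans with a direct single pass down each column that maintains a running prefix maximum.
import Mathlib
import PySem

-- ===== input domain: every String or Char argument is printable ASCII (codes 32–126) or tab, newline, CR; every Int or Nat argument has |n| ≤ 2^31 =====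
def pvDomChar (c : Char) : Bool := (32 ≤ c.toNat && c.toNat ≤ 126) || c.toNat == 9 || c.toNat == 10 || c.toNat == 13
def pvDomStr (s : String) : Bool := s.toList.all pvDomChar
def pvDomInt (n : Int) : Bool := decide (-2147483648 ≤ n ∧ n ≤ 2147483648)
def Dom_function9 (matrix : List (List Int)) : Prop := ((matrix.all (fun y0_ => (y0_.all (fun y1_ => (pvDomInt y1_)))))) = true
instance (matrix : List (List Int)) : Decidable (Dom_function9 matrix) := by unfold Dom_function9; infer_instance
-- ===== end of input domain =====

-- B replaces A's transpose + per-row max(column[:l]) rescans by one pass per column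
-- with a running prefix maximum (objective: faster, asymptotic).


-- ===== PORT A =====
-- list(zip(*matrix)): columns 0 .. (min row length)-1, column c holds row[c] of every row
-- (indices are always in range, so getD's default is never used)
def pvZipStar (matrix : List (List Int)) : List (List Int) :=
  (List.range ((matrix.map List.length).min?.getD 0)).map (fun c => matrix.map (fun r => r.getD c 0))

def function9 (matrix : List (List Int)) : List (Int × Int) :=
  let t := pvZipStar matrix
  (List.range t.length).foldl (fun acc c =>
    (PySem.List.pyRange 1 ((t.headD []).length : Int) 1).foldl (fun acc2 l =>
      -- matrix_transpose[c][l] <= max(matrix_transpose[c][:l]); the slice is nonempty (l ≥ 1)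
      if PySem.List.pyGetD (t.getD c []) l 0 ≤
         ((PySem.List.max? (PySem.List.slice (t.getD c []) none (some l)) (fun y => y)).getD 0)
      then acc2 ++ [(l, (c : Int))] else acc2) acc) []

-- ===== PORT B =====
def function9_alt (matrix : List (List Int)) : List (Int × Int) :=
  match matrix with
  | [] => []
  | r0 :: rest =>
    let ncols := ((r0 :: rest).map List.length).min?.getD 0
    (List.range ncols).foldl (fun res c =>
      ((List.range' 1 rest.length).foldl
        (fun (st : Int × List (Int × Int)) l =>
          let v := ((r0 :: rest).getD l []).getD c 0
          if v ≤ st.1 then (st.1, st.2 ++ [((l : Int), (c : Int))])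
          else (v, st.2))
        ((r0.getD c 0), res)).2) []

-- ===== PRECONDITION & SPEC =====
def Spec_function9 (matrix : List (List Int)) (out : List (Int × Int)) : Prop := out = function9_alt matrix
instance (matrix : List (List Int)) (out : List (Int × Int)) : Decidable (Spec_function9 matrix out) := by unfold Spec_function9; infer_instance

-- ===== CLAIM (what is proved, stated in full; the proofs are below) =====
def Claim_equal_function9 : Prop := ∀ (matrix : List (List Int)), Dom_function9 matrix → Spec_function9 matrix (function9 matrix)

-- ===== LEMMAS AND PROOFS =====

-- the prefix maximum grows by one element: max(col[:j+1]) = max(max(col[:j]), col[j])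
lemma pvMaxTake (col : List Int) (j : Nat) (b : Int) (hj : 1 ≤ j) (hlt : j < col.length)
    (hb : PySem.List.max? (col.take j) (fun y => y) = some b) :
    PySem.List.max? (col.take (j+1)) (fun y => y) = some (max b (col.getD j 0)) := by
  obtain ⟨y, t, ht⟩ : ∃ y t, col.take j = y :: t := by
    cases hcol : col.take j with
    | nil =>
        rw [List.take_eq_nil_iff] at hcol
        exfalso
        rcases hcol with h | h
        · omega
        · subst h; simp at hlt
    | cons y t => exact ⟨y, t, rfl⟩
  have htake : col.take (j+1) = y :: (t ++ [col.getD j 0]) := by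
    rw [List.take_add_one, ht]
    simp [List.getD, List.getElem?_eq_getElem hlt]
  rw [htake, PySem.List.max?_id_cons]
  rw [ht, PySem.List.max?_id_cons] at hb
  simp only [Option.some.injEq] at hb ⊢
  rw [List.foldl_append, hb]
  rfl

-- core invariant: B's running-max pass over rows j..j+len-1 produces exactly
-- A's conditional appends over the same index range, given b = max(col[:j])
lemma pvColLoop (col : List Int) (c : Int) :
    ∀ (len j : Nat) (b : Int) (res : List (Int × Int)),
    1 ≤ j → j + len ≤ col.length →
    PySem.List.max? (col.take j) (fun y => y) = some b →
    ((List.range' j len).foldl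
       (fun (st : Int × List (Int × Int)) l =>
         if col.getD l 0 ≤ st.1 then (st.1, st.2 ++ [((l : Int), c)])
         else (col.getD l 0, st.2)) (b, res)).2
    = (PySem.List.pyRange (j : Int) ((j : Int) + (len : Int))).foldl
       (fun acc2 l =>
         if PySem.List.pyGetD col l 0 ≤
            ((PySem.List.max? (PySem.List.slice col none (some l)) (fun y => y)).getD 0)
         then acc2 ++ [(l, c)] else acc2) res := by
  intro len
  induction len with
  | zero =>
      intro j b res hj hlen hb
      rw [PySem.List.pyRange_one_eq_nil (by omega)]
      rfl
  | succ n ih =>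
      intro j b res hj hlen hb
      have hlt : j < col.length := by omega
      have hb' := pvMaxTake col j b hj hlt hb
      have hcond : (PySem.List.pyGetD col (j : Int) 0 ≤
          ((PySem.List.max? (PySem.List.slice col none (some (j : Int))) (fun y => y)).getD 0))
          ↔ col.getD j 0 ≤ b := by
        rw [PySem.List.pyGetD_natCast, PySem.List.slice_to_natCast, hb]
        simp
      have hsplit : PySem.List.pyRange (j : Int) ((j : Int) + ((n + 1 : Nat) : Int)) =
          (j : Int) :: PySem.List.pyRange (((j + 1 : Nat) : Int)) (((j + 1 : Nat) : Int) + (n : Int)) := by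
        rw [show ((j : Int) + ((n + 1 : Nat) : Int)) = (((j + 1 : Nat) : Int) + (n : Int)) by
              push_cast; ring,
            PySem.List.pyRange_one_cons (by push_cast; omega)]
        norm_cast
      rw [hsplit, show List.range' j (n+1) = j :: List.range' (j+1) n from rfl]
      simp only [List.foldl_cons]
      by_cases hc : col.getD j 0 ≤ b
      · rw [if_pos hc, if_pos (hcond.mpr hc)]
        exact ih (j+1) b (res ++ [((j : Int), c)]) (by omega) (by omega)
          (by rw [max_eq_left hc] at hb'; exact hb')
      · rw [if_neg hc, if_neg (fun h => hc (hcond.mp h))]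
        exact ih (j+1) (col.getD j 0) res (by omega) (by omega)
          (by rw [max_eq_right (by omega)] at hb'; exact hb')


-- matrix[l][c] read directly equals entry l of the mapped column
lemma pvGetDMap (m : List (List Int)) (c l : Nat) (hl : l < m.length) :
    ((m.getD l []).getD c 0) = ((m.map (fun r => r.getD c 0)).getD l 0) := by
  simp [List.getD_eq_getElem?_getD, List.getElem?_map, List.getElem?_eq_getElem hl]

-- ===== VERDICT (by name: the statement is the Claim_ definition above) =====
theorem function9_spec : Claim_equal_function9 := by
  intro matrix _
  unfold Spec_function9 function9 function9_alt pvZipStar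
  cases matrix with
  | nil => rfl
  | cons r0 rest =>
      cases hk : ((r0 :: rest).map List.length).min?.getD 0 with
      | zero => simp only [List.length_map, List.length_range, hk]; rfl
      | succ k =>
        simp only [List.length_map, List.length_range, hk]
        apply PySem.List.foldl_congr_mem
        intro acc c hc
        have hclt : c < k + 1 := List.mem_range.mp hc
        set colFn : Nat → List Int := fun c => (r0 :: rest).map (fun r => r.getD c 0) with hcolFn
        have hgetc : ((List.range (k+1)).map colFn).getD c [] = colFn c :=
          PySem.List.getD_map_range colFn (k+1) c [] hclt
        have hhead : ((List.range (k+1)).map colFn).headD [] = colFn 0 := by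
          rw [List.range_succ_eq_map]
          rfl
        have hlen0 : (colFn 0).length = rest.length + 1 := by simp [hcolFn]
        rw [hgetc, hhead, hlen0]
        have hbody : ∀ (st : Int × List (Int × Int)), ∀ l ∈ List.range' 1 rest.length,
            (fun (st : Int × List (Int × Int)) l =>
              if ((r0 :: rest).getD l []).getD c 0 ≤ st.1 then (st.1, st.2 ++ [((l : Int), (c : Int))])
              else (((r0 :: rest).getD l []).getD c 0, st.2)) st l
            = (fun (st : Int × List (Int × Int)) l =>
              if (colFn c).getD l 0 ≤ st.1 then (st.1, st.2 ++ [((l : Int), (c : Int))])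
              else ((colFn c).getD l 0, st.2)) st l := by
          intro st l hl
          have hl' : l < (r0 :: rest).length := by
            have := (List.mem_range'_1.mp hl)
            simp
            omega
          beta_reduce
          rw [pvGetDMap (r0 :: rest) c l hl']
        rw [PySem.List.foldl_congr_mem _ _ _ _ hbody]
        have hb1 : PySem.List.max? ((colFn c).take 1) (fun y => y) = some (r0.getD c 0) := by
          simp [hcolFn, PySem.List.max?_id_cons]
        rw [pvColLoop (colFn c) (c : Int) rest.length 1 (r0.getD c 0) acc (by omega)
          (by simp [hcolFn]; omega) hb1]
        norm_cast
        rw [Nat.add_comm 1 rest.length]
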